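-- pv_equiv track=rewrite | github.com/TessFerrandez/algorithms | contest/w-335/lc-h-2584-split-the-array-to-make-coprime-products.py | findValidSplit_tle
-- ===== SOURCE A (Python) =====
-- from typing import List
-- from math import gcd, sqrt
--
-- def findValidSplit_tle(nums: List[int]) -> int:
--     current = 1
--     prefix_prod = []
--
--     for num in nums:
--         current *= num
--         prefix_prod.append(current)
--
--     current = 1
--     suffix_prod = []
--
--     for num in nums[::-1]:
--         current *= num
--         suffix_prod.append(current)
--
--     n = len(nums)
--     for i in range(n - 1):
--         if gcd(prefix_prod[i], suffix_prod[n - i - 2]) == 1: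
--             return i
--
--     return -1
-- ===== SOURCE B (Python) =====
-- from typing import List
-- from math import gcd
--
--
-- def findValidSplit_tle(nums: List[int]) -> int:
--     # Conflict-reach sweep: a split at i is valid iff every element of the prefix
--     # is coprime to every element of the suffix; track the furthest index that
--     # conflicts with any element seen so far, and return the first i it cannot pass.
--     n = len(nums)
--     reach = 0
--     for i in range(n - 1):
--         for k in range(i + 1, n):
--             if gcd(nums[i], nums[k]) != 1:
--                 reach = max(reach, k)
--         if reach <= i:
--             return i
--     return -1
-- ===== Notes on version B (the rewrite author's own statement) =====
-- stated objective: alternative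
-- what changed: Instead of building big-integer prefix/suffix product arrays and taking huge gcds, B checks splits via element-wise coprimality: it tracks the furthest index that shares a factor with any element seen so far and returns the first index this 'reach' cannot pass.
import Mathlib
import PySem

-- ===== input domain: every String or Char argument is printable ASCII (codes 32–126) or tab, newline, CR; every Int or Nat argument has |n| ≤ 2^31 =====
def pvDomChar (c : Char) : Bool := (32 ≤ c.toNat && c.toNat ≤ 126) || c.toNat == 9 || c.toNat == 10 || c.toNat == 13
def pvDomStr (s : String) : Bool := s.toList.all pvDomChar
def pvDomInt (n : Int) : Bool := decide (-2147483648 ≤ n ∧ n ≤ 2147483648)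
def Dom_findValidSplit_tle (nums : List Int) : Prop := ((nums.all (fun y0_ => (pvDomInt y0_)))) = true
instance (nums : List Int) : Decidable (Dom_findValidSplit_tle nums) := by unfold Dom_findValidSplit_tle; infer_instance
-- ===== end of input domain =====

-- B replaces A's big-integer prefix/suffix product arrays by an element-wise
-- conflict-reach sweep (first split index that no shared-factor pair crosses); objective: alternative algorithm.

-- ===== PORT A =====
-- 'current *= num; list.append(current)' step shared by A's two product-building loops
def pvProdStep (st : Int × List Int) (num : Int) : Int × List Int :=
  (st.1 * num, st.2 ++ [st.1 * num])

-- 'for i in range(n-1): if gcd(...) == 1: return i' with early return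
def pvALoop (pre suf : List Int) (n : Int) : List Int → Int
  | [] => -1
  | i :: rest =>
    if Int.gcd (PySem.List.pyGetD pre i 0) (PySem.List.pyGetD suf (n - i - 2) 0) = 1 then i
    else pvALoop pre suf n rest

def findValidSplit_tle (nums : List Int) : Int :=
  let prefix_prod := (nums.foldl pvProdStep (1, [])).2
  let rev := (PySem.List.slice? nums none none (-1)).getD []   -- nums[::-1]
  let suffix_prod := (rev.foldl pvProdStep (1, [])).2
  let n : Int := nums.length
  pvALoop prefix_prod suffix_prod n (PySem.List.pyRange 0 (n - 1) 1)

-- ===== PORT B =====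
-- inner loop: 'for k in range(i+1, n): if gcd(nums[i], nums[k]) != 1: reach = max(reach, k)'
def pvBInner (nums : List Int) (n i reach : Int) : Int :=
  (PySem.List.pyRange (i + 1) n 1).foldl
    (fun r k =>
      if Int.gcd (PySem.List.pyGetD nums i 0) (PySem.List.pyGetD nums k 0) ≠ 1 then max r k else r)
    reach

-- outer loop: 'for i in range(n-1): …; if reach <= i: return i'
def pvBLoop (nums : List Int) (n : Int) (reach : Int) : List Int → Int
  | [] => -1
  | i :: rest =>
    let reach' := pvBInner nums n i reach
    if reach' ≤ i then i else pvBLoop nums n reach' rest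

def findValidSplit_tle_alt (nums : List Int) : Int :=
  let n : Int := nums.length
  pvBLoop nums n 0 (PySem.List.pyRange 0 (n - 1) 1)

-- ===== PRECONDITION & SPEC =====
def Spec_findValidSplit_tle (nums : List Int) (out : Int) : Prop := out = findValidSplit_tle_alt nums
instance (nums : List Int) (out : Int) : Decidable (Spec_findValidSplit_tle nums out) := by unfold Spec_findValidSplit_tle; infer_instance

-- ===== CLAIM (what is proved, stated in full; the proofs are below) =====
def Claim_equal_findValidSplit_tle : Prop := ∀ (nums : List Int), Dom_findValidSplit_tle nums → Spec_findValidSplit_tle nums (findValidSplit_tle nums)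

-- ===== LEMMAS AND PROOFS =====

/-- The running-product list a `pvProdStep` fold builds, with start value `c`. -/
def pvPrefixList (c : Int) : List Int → List Int
  | [] => []
  | x :: xs => (c * x) :: pvPrefixList (c * x) xs

theorem pvProdStep_fold (nums : List Int) : ∀ (c : Int) (acc : List Int),
    nums.foldl pvProdStep (c, acc) = (c * nums.prod, acc ++ pvPrefixList c nums) := by
  induction nums with
  | nil => intro c acc; simp [pvPrefixList]
  | cons x xs ih =>
    intro c acc
    simp only [List.foldl_cons, pvProdStep, pvPrefixList, List.prod_cons]
    rw [ih]
    simp [mul_assoc]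

theorem pvPrefixList_getD (nums : List Int) : ∀ (c : Int) (j : Nat), j < nums.length →
    (pvPrefixList c nums).getD j 0 = c * (nums.take (j + 1)).prod := by
  induction nums with
  | nil => intro c j h; simp at h
  | cons x xs ih =>
    intro c j h
    cases j with
    | zero => simp [pvPrefixList]
    | succ j =>
      simp only [pvPrefixList, List.getD_cons_succ, List.take_succ_cons, List.prod_cons]
      rw [ih (c * x) j (by simpa using h)]
      ring

/-- gcd of a list product with m is 1 iff gcd of each factor with m is 1. -/
theorem pvGcdProdLeft (m : Int) (l : List Int) :
    Int.gcd l.prod m = 1 ↔ ∀ a ∈ l, Int.gcd a m = 1 := by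
  induction l with
  | nil => simp [Int.gcd]
  | cons a l ih =>
    simp only [List.prod_cons, List.mem_cons]
    constructor
    · intro h
      have h' : Nat.Coprime (a.natAbs * l.prod.natAbs) m.natAbs := by
        simpa [Int.gcd, Int.natAbs_mul] using h
      rw [Nat.coprime_mul_iff_left] at h'
      rintro b (rfl | hb)
      · exact h'.1
      · exact ih.mp h'.2 b hb
    · intro h
      have h1 : Nat.Coprime a.natAbs m.natAbs := h a (Or.inl rfl)
      have h2 : Int.gcd l.prod m = 1 := ih.mpr fun b hb => h b (Or.inr hb)
      have h2' : Nat.Coprime l.prod.natAbs m.natAbs := h2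
      have : Nat.Coprime (a.natAbs * l.prod.natAbs) m.natAbs := Nat.Coprime.mul_left h1 h2'
      simpa [Int.gcd, Int.natAbs_mul] using this

theorem pvGcdProdRight (a : Int) (l : List Int) :
    Int.gcd a l.prod = 1 ↔ ∀ b ∈ l, Int.gcd a b = 1 := by
  rw [Int.gcd_comm, pvGcdProdLeft]
  exact forall₂_congr fun b _ => by rw [Int.gcd_comm]

/-- A's gcd check at split j equals element-wise coprimality across the split. -/
theorem pvCondA (nums : List Int) (j : Nat) (hj : j + 1 < nums.length) :
    (Int.gcd ((nums.take (j + 1)).prod) ((nums.drop (j + 1)).prod) = 1) ↔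
    (∀ p k : Nat, p ≤ j → j < k → k < nums.length → Int.gcd (nums.getD p 0) (nums.getD k 0) = 1) := by
  rw [pvGcdProdLeft]
  constructor
  · intro h p k hp hk hkn
    have hpn : p < nums.length := by omega
    have hpt : p < (nums.take (j + 1)).length := by simp; omega
    have hmem : nums.getD p 0 ∈ nums.take (j + 1) := by
      rw [List.getD_eq_getElem nums 0 hpn]
      have he : (nums.take (j + 1))[p]'hpt = nums[p]'hpn := by
        simp [List.getElem_take]
      rw [← he]; exact List.getElem_mem _
    have h1 := (pvGcdProdRight _ _).mp (h _ hmem)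
    have hkd : k - (j + 1) < (nums.drop (j + 1)).length := by simp; omega
    have hmem2 : nums.getD k 0 ∈ nums.drop (j + 1) := by
      rw [List.getD_eq_getElem nums 0 hkn]
      have : (nums.drop (j + 1))[k - (j + 1)]'hkd = nums[k]'hkn := by
        simp [List.getElem_drop]; congr 1; omega
      rw [← this]; exact List.getElem_mem _
    exact h1 _ hmem2
  · intro h a ha
    rw [pvGcdProdRight]
    intro b hb
    obtain ⟨p, hp, rfl⟩ := List.mem_iff_getElem.mp ha
    obtain ⟨m, hm, rfl⟩ := List.mem_iff_getElem.mp hb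
    have hpt : p < j + 1 := by have := hp; simp at this; omega
    have hmn : j + 1 + m < nums.length := by have := hm; simp at this; omega
    have e1 : (nums.take (j + 1))[p]'hp = nums.getD p 0 := by
      rw [List.getD_eq_getElem nums 0 (by omega)]; simp [List.getElem_take]
    have e2 : (nums.drop (j + 1))[m]'hm = nums.getD (j + 1 + m) 0 := by
      rw [List.getD_eq_getElem nums 0 hmn]; simp [List.getElem_drop]
    rw [e1, e2]
    exact h p (j + 1 + m) (by omega) (by omega) hmn

/-- Inner-fold characterisation: the folded reach is ≤ t iff the start is and every conflicting k is. -/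
theorem pvFoldMax (c : Int → Prop) [DecidablePred c] (l : List Int) : ∀ (r t : Int),
    (l.foldl (fun r k => if c k then max r k else r) r ≤ t ↔ r ≤ t ∧ ∀ k ∈ l, c k → k ≤ t) := by
  induction l with
  | nil => intro r t; simp
  | cons k l ih =>
    intro r t
    simp only [List.foldl_cons, List.mem_cons]
    by_cases hc : c k
    · rw [if_pos hc, ih]
      constructor
      · rintro ⟨h1, h2⟩
        exact ⟨le_trans (le_max_left _ _) h1, by
          rintro k' (rfl | hk') hck'
          · exact le_trans (le_max_right _ _) h1
          · exact h2 k' hk' hck'⟩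
      · rintro ⟨h1, h2⟩
        exact ⟨max_le h1 (h2 k (Or.inl rfl) hc), fun k' hk' => h2 k' (Or.inr hk')⟩
    · rw [if_neg hc, ih]
      constructor
      · rintro ⟨h1, h2⟩
        refine ⟨h1, ?_⟩
        rintro k' (rfl | hk') hck'
        · exact absurd hck' hc
        · exact h2 k' hk' hck'
      · rintro ⟨h1, h2⟩
        exact ⟨h1, fun k' hk' => h2 k' (Or.inr hk')⟩

/-- entry of A's prefix-product list. -/
theorem pvPrefixEntry (nums : List Int) (j : Nat) (hj : j < nums.length) :
    PySem.List.pyGetD (pvPrefixList 1 nums) (j : Int) 0 = (nums.take (j + 1)).prod := by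
  rw [PySem.List.pyGetD_natCast]
  rw [pvPrefixList_getD nums 1 j hj]
  ring

/-- entry of A's suffix-product list. -/
theorem pvSuffixEntry (nums : List Int) (j : Nat) (hj : j + 1 < nums.length) :
    PySem.List.pyGetD (pvPrefixList 1 nums.reverse) ((nums.length : Int) - (j : Int) - 2) 0
      = (nums.drop (j + 1)).prod := by
  have hcast : ((nums.length : Int) - (j : Int) - 2) = ((nums.length - j - 2 : Nat) : Int) := by
    omega
  rw [hcast, PySem.List.pyGetD_natCast]
  rw [pvPrefixList_getD nums.reverse 1 (nums.length - j - 2) (by simp; omega)]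
  have htk : nums.length - j - 2 + 1 = nums.length - (j + 1) := by omega
  rw [htk, List.take_reverse]
  have : nums.length - (nums.length - (j + 1)) = j + 1 := by omega
  rw [this, List.prod_reverse]
  ring

/-- characterisation of B's inner fold. -/
theorem pvBInnerLe (nums : List Int) (aN : Nat) (reach t : Int) :
    pvBInner nums nums.length (aN : Int) reach ≤ t ↔
      reach ≤ t ∧ ∀ k : Nat, aN < k → k < nums.length →
        Int.gcd (nums.getD aN 0) (nums.getD k 0) ≠ 1 → (k : Int) ≤ t := by
  unfold pvBInner
  rw [pvFoldMax (fun k => Int.gcd (PySem.List.pyGetD nums (aN : Int) 0) (PySem.List.pyGetD nums k 0) ≠ 1)]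
  constructor
  · rintro ⟨h1, h2⟩
    refine ⟨h1, fun k hk hkn hg => ?_⟩
    refine h2 (k : Int) ?_ ?_
    · rw [PySem.List.mem_pyRange_one]; omega
    · simpa [PySem.List.pyGetD_natCast] using hg
  · rintro ⟨h1, h2⟩
    refine ⟨h1, fun k hk hg => ?_⟩
    rw [PySem.List.mem_pyRange_one] at hk
    have hk0 : 0 ≤ k := by omega
    obtain ⟨kn, rfl⟩ : ∃ kn : Nat, k = (kn : Int) := ⟨k.toNat, by omega⟩
    refine h2 kn (by omega) (by omega) ?_
    simpa [PySem.List.pyGetD_natCast] using hg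

/-- B's reach invariant after the iterations 0..aN-1. -/
def pvInv (nums : List Int) (aN : Nat) (reach : Int) : Prop :=
  ∀ t : Int, reach ≤ t ↔ (0 ≤ t ∧ ∀ p k : Nat, p < aN → p < k → k < nums.length →
    Int.gcd (nums.getD p 0) (nums.getD k 0) ≠ 1 → (k : Int) ≤ t)

theorem pvInvStep (nums : List Int) (aN : Nat) (reach : Int) (h : pvInv nums aN reach) :
    pvInv nums (aN + 1) (pvBInner nums nums.length (aN : Int) reach) := by
  intro t
  rw [pvBInnerLe, h t]
  constructor
  · rintro ⟨⟨h0, hold⟩, hnew⟩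
    refine ⟨h0, fun p k hp hpk hkn hg => ?_⟩
    rcases Nat.lt_or_ge p aN with hlt | hge
    · exact hold p k hlt hpk hkn hg
    · have : p = aN := by omega
      subst this
      exact hnew k hpk hkn hg
  · rintro ⟨h0, hall⟩
    exact ⟨⟨h0, fun p k hp hpk hkn hg => hall p k (by omega) hpk hkn hg⟩,
      fun k hk hkn hg => hall aN k (by omega) hk hkn hg⟩

/-- the two loops agree, given B's invariant at entry. -/
theorem pvLoopEq (nums : List Int) (m : Nat) : ∀ (aN : Nat) (reach : Int),
    pvInv nums aN reach →
    ((nums.length : Int) - 1 - (aN : Int) ≤ (m : Int)) →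
    pvALoop (pvPrefixList 1 nums) (pvPrefixList 1 nums.reverse) (nums.length : Int)
        (PySem.List.pyRange (aN : Int) ((nums.length : Int) - 1) 1)
      = pvBLoop nums (nums.length : Int) reach
        (PySem.List.pyRange (aN : Int) ((nums.length : Int) - 1) 1) := by
  induction m with
  | zero =>
    intro aN reach _ hb
    rw [PySem.List.pyRange_one_eq_nil (by omega)]
    rfl
  | succ m ih =>
    intro aN reach hinv hb
    by_cases hle : ((nums.length : Int) - 1) ≤ (aN : Int)
    · rw [PySem.List.pyRange_one_eq_nil hle]; rfl
    · have hlt : (aN : Int) < (nums.length : Int) - 1 := by omega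
      rw [PySem.List.pyRange_one_cons hlt]
      have haj : aN + 1 < nums.length := by omega
      -- the two per-iteration conditions are equivalent
      have hA : (Int.gcd (PySem.List.pyGetD (pvPrefixList 1 nums) (aN : Int) 0)
            (PySem.List.pyGetD (pvPrefixList 1 nums.reverse) ((nums.length : Int) - (aN : Int) - 2) 0) = 1)
          ↔ (∀ p k : Nat, p ≤ aN → aN < k → k < nums.length →
              Int.gcd (nums.getD p 0) (nums.getD k 0) = 1) := by
        rw [pvPrefixEntry nums aN (by omega), pvSuffixEntry nums aN haj]
        exact pvCondA nums aN haj
      have hB : (pvBInner nums nums.length (aN : Int) reach ≤ (aN : Int))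
          ↔ (∀ p k : Nat, p ≤ aN → aN < k → k < nums.length →
              Int.gcd (nums.getD p 0) (nums.getD k 0) = 1) := by
        rw [pvBInnerLe, hinv]
        constructor
        · rintro ⟨⟨_, hold⟩, hnew⟩ p k hp hk hkn
          by_contra hg
          rcases Nat.lt_or_ge p aN with hlt' | hge'
          · have := hold p k hlt' (by omega) hkn hg; omega
          · have : p = aN := by omega
            subst this
            have := hnew k hk hkn hg; omega
        · intro hok
          refine ⟨⟨by omega, fun p k hp hpk hkn hg => ?_⟩, fun k hk hkn hg => ?_⟩
          · rcases Nat.lt_or_ge aN k with hgt | hle'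
            · exact absurd (hok p k (by omega) hgt hkn) hg
            · omega
          · exact absurd (hok aN k (by omega) hk hkn) hg
      simp only [pvALoop, pvBLoop]
      by_cases hc : (∀ p k : Nat, p ≤ aN → aN < k → k < nums.length →
          Int.gcd (nums.getD p 0) (nums.getD k 0) = 1)
      · rw [if_pos (hA.mpr hc), if_pos ?_]
        exact (by exact_mod_cast hB.mpr hc)
      · rw [if_neg (fun h => hc (hA.mp h)), if_neg (fun h => hc (hB.mp (by exact_mod_cast h)))]
        have hsucc : ((aN : Int) + 1) = ((aN + 1 : Nat) : Int) := by push_cast; ring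
        rw [hsucc]
        exact ih (aN + 1) _ (pvInvStep nums aN reach hinv) (by push_cast; omega)

-- ===== VERDICT (by name: the statement is the Claim_ definition above) =====
theorem findValidSplit_tle_spec : Claim_equal_findValidSplit_tle := by
  intro nums _
  unfold Spec_findValidSplit_tle findValidSplit_tle findValidSplit_tle_alt
  simp only [pvProdStep_fold, PySem.List.slice?_none_none_neg_one, Option.getD_some, List.nil_append]
  have h0 : PySem.List.pyRange 0 ((nums.length : Int) - 1) 1
      = PySem.List.pyRange ((0 : Nat) : Int) ((nums.length : Int) - 1) 1 := by norm_num
  rw [h0]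
  have hinv0 : pvInv nums 0 0 := by
    intro t
    constructor
    · intro ht; exact ⟨ht, fun p k hp _ _ _ => by omega⟩
    · rintro ⟨ht, _⟩; exact ht
  exact pvLoopEq nums nums.length 0 0 hinv0 (by push_cast; omega)
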